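-- pv_equiv track=rewrite | github.com/T-rav/hyrda | agent.py | _extract_plan_comment
-- ===== SOURCE A (Python) =====
-- def _extract_plan_comment(comments: list[str]) -> tuple[str, list[str]]:
--     """Separate the planner's implementation plan from other comments.
--
--     Returns ``(plan_text, remaining_comments)``.  *plan_text* is the
--     raw body of the first comment that contains ``## Implementation Plan``,
--     or an empty string if none is found.
--     """
--     plan = ""
--     remaining: list[str] = []
--     for c in comments:
--         if not plan and "## Implementation Plan" in c:
--             plan = c
--         else:
--             remaining.append(c)
--     return plan, remaining
-- ===== SOURCE B (Python) =====
-- def _extract_plan_comment(comments: list[str]) -> tuple[str, list[str]]: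
--     """Locate-then-slice: find the first plan comment's index, then slice it out."""
--     idx = next((i for i, c in enumerate(comments) if "## Implementation Plan" in c), None)
--     if idx is None:
--         return "", list(comments)
--     return comments[idx], comments[:idx] + comments[idx + 1:]
-- ===== Notes on version B (the rewrite author's own statement) =====
-- stated objective: idiomatic
-- what changed: Replaces the single accumulating loop with state (plan, remaining) by a locate-then-slice decomposition: find the first matching index with next(...), then slice the list around it.
import Mathlib
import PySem

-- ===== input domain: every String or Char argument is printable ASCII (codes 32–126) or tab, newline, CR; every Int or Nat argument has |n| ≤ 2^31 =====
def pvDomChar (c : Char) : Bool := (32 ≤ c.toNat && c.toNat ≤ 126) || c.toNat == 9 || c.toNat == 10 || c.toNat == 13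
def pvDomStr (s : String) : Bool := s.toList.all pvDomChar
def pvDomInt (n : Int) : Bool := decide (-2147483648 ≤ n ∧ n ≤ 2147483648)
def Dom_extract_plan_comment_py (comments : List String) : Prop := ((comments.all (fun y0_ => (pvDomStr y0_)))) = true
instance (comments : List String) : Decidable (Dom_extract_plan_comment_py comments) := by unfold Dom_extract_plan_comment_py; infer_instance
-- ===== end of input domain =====

-- B replaces A's accumulating loop by locate-then-slice; return values are proved equal on Dom.
-- ===== PORT A =====
-- the for-loop of A, as structural recursion over the same state (plan, remaining);
-- 'not plan' is Python truthiness of a string: plan = ""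
def pvLoopA : List String → String → List String → String × List String
  | [], plan, rem => (plan, rem)
  | c :: t, plan, rem =>
    if plan = "" ∧ PySem.Str.isIn "## Implementation Plan" c = true then
      pvLoopA t c rem
    else
      pvLoopA t plan (rem ++ [c])

def extract_plan_comment_py (comments : List String) : String × List String :=
  pvLoopA comments "" []

-- ===== PORT B =====
-- next((i for i, c in enumerate(comments) if "## Implementation Plan" in c), None) = findIdx?;
-- comments[:idx] / comments[idx+1:] with a valid non-negative idx are take idx / drop (idx+1)
def extract_plan_comment_py_alt (comments : List String) : String × List String :=
  match comments.findIdx? (fun c => PySem.Str.isIn "## Implementation Plan" c) with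
  | none => ("", comments)
  | some i => (comments.getD i "", comments.take i ++ comments.drop (i + 1))

-- ===== PRECONDITION & SPEC =====
def Spec_extract_plan_comment_py (comments : List String) (out : String × List String) : Prop := out = extract_plan_comment_py_alt comments
instance (comments : List String) (out : String × List String) : Decidable (Spec_extract_plan_comment_py comments out) := by unfold Spec_extract_plan_comment_py; infer_instance

-- ===== CLAIM (what is proved, stated in full; the proofs are below) =====
def Claim_equal_extract_plan_comment_py : Prop := ∀ (comments : List String), Dom_extract_plan_comment_py comments → Spec_extract_plan_comment_py comments (extract_plan_comment_py comments)

-- ===== LEMMAS AND PROOFS =====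

-- once a plan is held (plan ≠ ""), the loop only accumulates the rest
theorem pvLoopA_found (cs : List String) (plan : String) (rem : List String)
    (h : plan ≠ "") : pvLoopA cs plan rem = (plan, rem ++ cs) := by
  induction cs generalizing rem with
  | nil => simp [pvLoopA]
  | cons c t ih =>
    have hcond : ¬ (plan = "" ∧ PySem.Str.isIn "## Implementation Plan" c = true) :=
      fun hc => h hc.1
    simp only [pvLoopA, if_neg hcond]
    rw [ih (rem ++ [c])]
    simp

theorem pvMarker_ne_empty (c : String)
    (h : PySem.Str.isIn "## Implementation Plan" c = true) : c ≠ "" := by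
  intro hc; subst hc; exact absurd h (by decide)

theorem pvLoopA_eq_alt (cs : List String) (rem : List String) :
    pvLoopA cs "" rem =
      (match cs.findIdx? (fun c => PySem.Str.isIn "## Implementation Plan" c) with
        | none => ("", rem ++ cs)
        | some i => (cs.getD i "", rem ++ (cs.take i ++ cs.drop (i + 1)))) := by
  induction cs generalizing rem with
  | nil => simp [pvLoopA]
  | cons c t ih =>
    by_cases hc : PySem.Str.isIn "## Implementation Plan" c = true
    · have hcond : ("" : String) = "" ∧ PySem.Str.isIn "## Implementation Plan" c = true :=
        ⟨rfl, hc⟩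
      simp only [pvLoopA, List.findIdx?_cons, hc, if_pos]
      rw [pvLoopA_found t c rem (pvMarker_ne_empty c hc)]
      simp
    · simp only [pvLoopA, List.findIdx?_cons, hc]
      rw [ih (rem ++ [c])]
      cases hfi : t.findIdx? (fun c => PySem.Str.isIn "## Implementation Plan" c) with
      | none => simp
      | some i => simp [List.getD, List.drop_succ_cons]

-- ===== VERDICT (by name: the statement is the Claim_ definition above) =====
theorem extract_plan_comment_py_spec : Claim_equal_extract_plan_comment_py := by
  intro comments _
  unfold Spec_extract_plan_comment_py extract_plan_comment_py extract_plan_comment_py_alt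
  rw [pvLoopA_eq_alt]
  cases comments.findIdx? (fun c => PySem.Str.isIn "## Implementation Plan" c) <;> simp
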